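-- pv_equiv track=rewrite | github.com/Alexo47/Fixed-Income-Selection | Modules/ModGen_CharactersChainText.py | items_comma_converter
-- ===== SOURCE A (Python) =====
-- def items_comma_converter(line):
--     line_len = len(line)
--     liste = []
--     item = ''
--     for indx in range(line_len):
--         if line[indx] != ',':
--             item = item + line[indx]
--         else:
--             item = item.strip()
--             liste.append(item)
--             item = ''
-- # we have now finished parsing the line but we may have a last item
--     if len(item) >= 1:
--         item = item.strip()
--         liste.append(item)
--
--     return liste,len(liste)
-- ===== SOURCE B (Python) =====
-- def items_comma_converter(line):
--     parts = line.split(',')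
--     if parts and parts[-1] == '':
--         parts = parts[:-1]
--     result = [p.strip() for p in parts]
--     return result, len(result)
-- ===== Notes on version B (the rewrite author's own statement) =====
-- stated objective: faster
-- what changed: Replaced A's character-by-character accumulator loop with one split(',') call, dropping a single trailing empty segment, then stripping each part.
import Mathlib
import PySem

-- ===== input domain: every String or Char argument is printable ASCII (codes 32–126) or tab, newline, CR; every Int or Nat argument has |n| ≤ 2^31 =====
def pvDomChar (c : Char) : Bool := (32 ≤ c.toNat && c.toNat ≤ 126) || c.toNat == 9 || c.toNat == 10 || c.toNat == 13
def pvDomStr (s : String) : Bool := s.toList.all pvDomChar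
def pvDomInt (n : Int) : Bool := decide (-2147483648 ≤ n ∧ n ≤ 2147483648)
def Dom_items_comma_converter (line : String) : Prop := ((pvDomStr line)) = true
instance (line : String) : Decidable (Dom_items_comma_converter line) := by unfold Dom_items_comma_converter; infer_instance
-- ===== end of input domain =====

-- B replaces A's character-accumulator loop by split(',') + drop one trailing empty segment + strip each part (simpler decomposition, same cost).

-- ===== PORT A =====
-- the loop body: on a non-comma char extend the current item, on ',' strip and append it
def iccStep (st : List (List Char) × List Char) (c : Char) : List (List Char) × List Char :=
  if c ≠ ',' then (st.1, st.2 ++ [c])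
  else (st.1 ++ [PySem.Chars.strip st.2], [])

def items_comma_converter (line : String) : List String × Int :=
  let cs := line.toList
  let st := (PySem.List.pyRange 0 (PySem.List.len cs) 1).foldl
      (fun st j => iccStep st (PySem.List.pyGetD cs j ' ')) ([], [])
  let liste := if st.2.length ≥ 1 then st.1 ++ [PySem.Chars.strip st.2] else st.1
  (liste.map String.ofList, (liste.length : Int))

-- ===== PORT B =====
def items_comma_converter_alt (line : String) : List String × Int :=
  let parts := PySem.Chars.splitOn line.toList [',']
  let parts := if parts.getLast? = some [] then parts.dropLast else parts
  let result := parts.map (fun p => String.ofList (PySem.Chars.strip p))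
  (result, (result.length : Int))

-- ===== PRECONDITION & SPEC =====
def Spec_items_comma_converter (line : String) (out : List String × Int) : Prop := out = items_comma_converter_alt line
instance (line : String) (out : List String × Int) : Decidable (Spec_items_comma_converter line out) := by unfold Spec_items_comma_converter; infer_instance

-- ===== CLAIM (what is proved, stated in full; the proofs are below) =====
def Claim_equal_items_comma_converter : Prop := ∀ (line : String), Dom_items_comma_converter line → Spec_items_comma_converter line (items_comma_converter line)

-- ===== LEMMAS AND PROOFS =====

-- a structural characterisation of s.split(',')
def split1 : List Char → List (List Char)
  | [] => [[]]
  | c :: cs => if c = ',' then [] :: split1 cs else (split1 cs).modifyHead (c :: ·)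

theorem split1_ne_nil (cs : List Char) : split1 cs ≠ [] := by
  cases cs with
  | nil => simp [split1]
  | cons c cs =>
    simp only [split1]
    split_ifs <;> simp [List.modifyHead]
    cases h : split1 cs with
    | nil => exact absurd h (split1_ne_nil cs)
    | cons p ps => simp

theorem modifyHead_id_eq {α : Type} (l : List α) : l.modifyHead (fun x => x) = l := by
  cases l <;> rfl

theorem splitOn_go_eq (fuel : Nat) (l cur : List Char) (acc : List (List Char))
    (hf : l.length + 1 ≤ fuel) :
    PySem.Chars.splitOn.go [','] fuel l cur acc
      = acc.reverse ++ (split1 l).modifyHead (cur.reverse ++ ·) := by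
  induction fuel generalizing l cur acc with
  | zero => omega
  | succ f ih =>
    cases l with
    | nil =>
      simp [PySem.Chars.splitOn.go, split1]
    | cons c rest =>
      rw [PySem.Chars.splitOn.go]
      by_cases hc : c = ','
      · subst hc
        have : List.isPrefixOf [','] (',' :: rest) = true := by simp [List.isPrefixOf]
        simp only [this, if_pos, List.length_cons, List.drop_succ_cons, List.drop_zero,
          List.length_nil]
        rw [ih rest [] (cur.reverse :: acc) (by simp at hf ⊢; omega)]
        simp [split1, modifyHead_id_eq]
      · have : List.isPrefixOf [','] (c :: rest) = true → False := by
          simp [List.isPrefixOf]; intro h; exact hc h.symm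
        simp only [eq_false_intro this, if_false]
        rw [ih rest (c :: cur) acc (by simp at hf ⊢; omega)]
        simp only [split1, if_neg hc]
        congr 1
        cases h : split1 rest with
        | nil => exact absurd h (split1_ne_nil rest)
        | cons p ps => simp

theorem splitOn_eq_split1 (cs : List Char) :
    PySem.Chars.splitOn cs [','] = split1 cs := by
  rw [PySem.Chars.splitOn, splitOn_go_eq cs.length.succ cs [] [] (by omega)]
  simp
  cases h : split1 cs with
  | nil => exact absurd h (split1_ne_nil cs)
  | cons p ps => simp

-- A's loop, characterised by split1
theorem foldl_iccStep (cs : List Char) (acc : List (List Char)) (item : List Char) :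
    cs.foldl iccStep (acc, item)
      = (acc ++ (((split1 cs).modifyHead (item ++ ·)).dropLast).map PySem.Chars.strip,
         ((split1 cs).modifyHead (item ++ ·)).getLastD []) := by
  induction cs generalizing acc item with
  | nil => simp [split1, List.getLastD]
  | cons c rest ih =>
    simp only [List.foldl_cons]
    by_cases hc : c = ','
    · subst hc
      simp only [iccStep, ne_eq, not_true_eq_false, if_false]
      rw [ih]
      simp only [split1, List.modifyHead]
      obtain ⟨p, ps, h⟩ : ∃ p ps, split1 rest = p :: ps := by
        cases h : split1 rest with
        | nil => exact absurd h (split1_ne_nil rest)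
        | cons p ps => exact ⟨p, ps, rfl⟩
      rw [h]
      simp only [List.nil_append]
      cases ps <;> simp [List.getLastD]
    · simp only [iccStep, ne_eq, hc, not_false_eq_true, if_pos]
      rw [ih]
      simp only [split1, if_neg hc]
      obtain ⟨p, ps, h⟩ : ∃ p ps, split1 rest = p :: ps := by
        cases h : split1 rest with
        | nil => exact absurd h (split1_ne_nil rest)
        | cons p ps => exact ⟨p, ps, rfl⟩
      rw [h]
      have hx : (item ++ [c]) ++ p = item ++ (c :: p) := by simp
      simp only [List.modifyHead, hx]

-- ===== VERDICT (by name: the statement is the Claim_ definition above) =====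
theorem items_comma_converter_spec : Claim_equal_items_comma_converter := by
  intro line _
  unfold Spec_items_comma_converter items_comma_converter items_comma_converter_alt
  simp only [splitOn_eq_split1]
  rw [PySem.List.foldl_pyRange_zero_pyGetD line.toList ' ' iccStep ([], [])]
  rw [foldl_iccStep line.toList [] []]
  have hmod : (split1 line.toList).modifyHead (fun x => [] ++ x) = split1 line.toList := by
    cases h : split1 line.toList <;> simp [List.modifyHead]
  simp only [List.nil_append] at *
  rw [hmod]
  obtain h | ⟨l', x, h⟩ := List.eq_nil_or_concat (split1 line.toList)
  · exact absurd h (split1_ne_nil _)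
  · rw [h]
    by_cases hx : x = []
    · subst hx
      simp
    · simp [hx, Nat.one_le_iff_ne_zero,
        List.length_eq_zero_iff]
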